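-- pv_equiv track=rewrite | github.com/kevinzhang8492/SplitDAG | main.py | split_subgraph
-- ===== SOURCE A (Python) =====
-- from typing import List, Dict, Tuple
-- import copy
--
-- def split_subgraph(parent_graph: Dict[int, List[int]], sub_graph:Dict[int, List[int]]) -> Dict[int, List[int]]:
--     new_graph = copy.deepcopy(parent_graph)
--     for node in sub_graph.keys():
--         new_graph.pop(node, None)
--     for node0 in new_graph.keys():
--         for node in sub_graph.keys():
--             if node in new_graph[node0]: new_graph[node0].remove(node)
--     return new_graph
-- ===== SOURCE B (Python) =====
-- def split_subgraph(parent_graph, sub_graph):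
--     removed = set(sub_graph)
--     return {node: [n for n in adj if n not in removed]
--             for node, adj in parent_graph.items()
--             if node not in removed}
-- ===== Notes on version B (the rewrite author's own statement) =====
-- stated objective: idiomatic
-- what changed: Replaces deepcopy + per-key pop + nested membership-test/remove passes with a single dict comprehension over parent_graph that skips removed nodes and filters each adjacency list in one pass against a set of sub-graph keys.
-- intended difference: On graphs where a kept node's adjacency list contains a removed node more than once, A's list.remove drops only the first occurrence and returns an edge list still referencing the removed node, while B removes every reference, which is the intent of deleting the subgraph's nodes. — e.g. on split_subgraph([(1, [2, 2])], [(2, [])]): A returns [(1, [2])], B returns [(1, [])]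
import Mathlib
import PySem

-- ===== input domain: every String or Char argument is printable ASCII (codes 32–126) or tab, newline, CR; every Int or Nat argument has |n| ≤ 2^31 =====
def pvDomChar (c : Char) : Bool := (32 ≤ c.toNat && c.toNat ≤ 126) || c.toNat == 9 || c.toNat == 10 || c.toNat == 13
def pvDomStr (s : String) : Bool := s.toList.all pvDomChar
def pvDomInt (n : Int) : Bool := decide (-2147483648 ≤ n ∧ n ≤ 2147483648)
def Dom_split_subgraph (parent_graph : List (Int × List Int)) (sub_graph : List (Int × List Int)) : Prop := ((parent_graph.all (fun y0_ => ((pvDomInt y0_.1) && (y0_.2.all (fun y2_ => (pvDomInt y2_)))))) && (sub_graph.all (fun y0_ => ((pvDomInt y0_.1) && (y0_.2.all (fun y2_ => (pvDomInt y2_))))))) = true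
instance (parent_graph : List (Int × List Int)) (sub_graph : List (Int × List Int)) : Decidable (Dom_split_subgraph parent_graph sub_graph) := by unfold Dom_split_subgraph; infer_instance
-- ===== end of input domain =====

-- B is the idiomatic rewrite: one dict comprehension that skips removed nodes and filters
-- each adjacency list against the set of sub-graph keys; on adjacency lists holding a
-- removed node more than once B removes every reference where A removes only the first
-- (stated as the intended difference D_ below). Return-value equivalence only (A copies,
-- neither mutates its arguments).

-- ===== PORT A =====
def split_subgraph (parent_graph : List (Int × List Int)) (sub_graph : List (Int × List Int)) : List (Int × List Int) :=
  -- new_graph = copy.deepcopy(parent_graph); for node in sub_graph.keys(): new_graph.pop(node, None)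
  -- (pop on the association list removes the first entry with that key, if any)
  let subkeys := sub_graph.map Prod.fst
  let new_graph := subkeys.foldl (fun g node => g.eraseP (fun p => p.1 == node)) parent_graph
  -- for node0 in new_graph.keys(): for node in sub_graph.keys():
  --   if node in new_graph[node0]: new_graph[node0].remove(node)
  new_graph.map (fun p =>
    (p.1, subkeys.foldl
      (fun l node => if l.contains node then (PySem.List.remove? l node).getD l else l) p.2))

-- ===== PORT B =====
def split_subgraph_alt (parent_graph : List (Int × List Int)) (sub_graph : List (Int × List Int)) : List (Int × List Int) :=
  let removed : PySem.Set Int := PySem.Set.ofList (sub_graph.map Prod.fst)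
  parent_graph.filterMap (fun p =>
    if PySem.Set.contains removed p.1 then none
    else some (p.1, p.2.filter (fun n => !PySem.Set.contains removed n)))

-- ===== PRECONDITION & SPEC =====
-- Pre_ excludes association lists with duplicate keys: they represent no Python dict
-- (Python dict keys are unique), so no Python input of A is excluded.
def Pre_split_subgraph (parent_graph : List (Int × List Int)) (sub_graph : List (Int × List Int)) : Prop :=
  (parent_graph.map Prod.fst).Nodup ∧ (sub_graph.map Prod.fst).Nodup
instance (parent_graph : List (Int × List Int)) (sub_graph : List (Int × List Int)) : Decidable (Pre_split_subgraph parent_graph sub_graph) := by unfold Pre_split_subgraph; infer_instance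

def pvWitness_split_subgraph : (List (Int × List Int)) × (List (Int × List Int)) :=
  ([(1, [2, 3]), (2, [1, 3]), (4, [])], [(3, [1]), (2, [])])

-- On graphs where a kept node's adjacency list contains a removed node more than once,
-- A's list.remove drops only the first occurrence and returns an edge list still
-- referencing the removed node, while B removes every reference, which is the intent of
-- deleting the subgraph's nodes.
def D_split_subgraph (parent_graph : List (Int × List Int)) (sub_graph : List (Int × List Int)) : Prop :=
  ∃ p ∈ parent_graph, p.1 ∉ sub_graph.map Prod.fst ∧
    ∃ s ∈ sub_graph.map Prod.fst, 2 ≤ p.2.count s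
instance (parent_graph : List (Int × List Int)) (sub_graph : List (Int × List Int)) : Decidable (D_split_subgraph parent_graph sub_graph) := by unfold D_split_subgraph; infer_instance

def Spec_split_subgraph (parent_graph : List (Int × List Int)) (sub_graph : List (Int × List Int)) (out : List (Int × List Int)) : Prop := ¬ D_split_subgraph parent_graph sub_graph → out = split_subgraph_alt parent_graph sub_graph
instance (parent_graph : List (Int × List Int)) (sub_graph : List (Int × List Int)) (out : List (Int × List Int)) : Decidable (Spec_split_subgraph parent_graph sub_graph out) := by unfold Spec_split_subgraph; infer_instance

def pvDiffWitness_split_subgraph : (List (Int × List Int)) × (List (Int × List Int)) :=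
  ([(1, [2, 2])], [(2, [])])
def pvDiffWitnessOut_split_subgraph : (List (Int × List Int)) × (List (Int × List Int)) :=
  ([(1, [2])], [(1, [])])

-- ===== CLAIM =====
def Claim_unchanged_split_subgraph : Prop := ∀ (parent_graph : List (Int × List Int)) (sub_graph : List (Int × List Int)), Dom_split_subgraph parent_graph sub_graph → Pre_split_subgraph parent_graph sub_graph → Spec_split_subgraph parent_graph sub_graph (split_subgraph parent_graph sub_graph)
def Claim_changed_split_subgraph : Prop := Dom_split_subgraph (pvDiffWitness_split_subgraph.1) (pvDiffWitness_split_subgraph.2) ∧ Pre_split_subgraph (pvDiffWitness_split_subgraph.1) (pvDiffWitness_split_subgraph.2) ∧ D_split_subgraph (pvDiffWitness_split_subgraph.1) (pvDiffWitness_split_subgraph.2) ∧ split_subgraph (pvDiffWitness_split_subgraph.1) (pvDiffWitness_split_subgraph.2) = pvDiffWitnessOut_split_subgraph.1 ∧ split_subgraph_alt (pvDiffWitness_split_subgraph.1) (pvDiffWitness_split_subgraph.2) = pvDiffWitnessOut_split_subgraph.2 ∧ pvDiffWitnessOut_split_subgraph.1 ≠ pvDiffWitnessOut_split_subgraph.2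
def Claim_exact_split_subgraph : Prop := ∀ (parent_graph : List (Int × List Int)) (sub_graph : List (Int × List Int)), Dom_split_subgraph parent_graph sub_graph → Pre_split_subgraph parent_graph sub_graph → D_split_subgraph parent_graph sub_graph → split_subgraph parent_graph sub_graph ≠ split_subgraph_alt parent_graph sub_graph

-- ===== LEMMAS AND PROOFS =====

-- A's guarded remove step is erase-first-occurrence
theorem eraseOnce_eq_erase (l : List Int) (n : Int) :
    (if l.contains n then (PySem.List.remove? l n).getD l else l) = l.erase n := by
  by_cases h : n ∈ l
  · rw [if_pos (by simpa using h), PySem.List.remove?_eq_some_erase l n h, Option.getD_some]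
  · rw [if_neg (by simpa using h), List.erase_of_not_mem h]

-- pop on a duplicate-free association list is a key filter
theorem eraseP_keys (pg : List (Int × List Int)) (n : Int)
    (h : (pg.map Prod.fst).Nodup) :
    pg.eraseP (fun p => p.1 == n) = pg.filter (fun p => p.1 != n) := by
  induction pg with
  | nil => rfl
  | cons p rest ih =>
    simp only [List.map_cons, List.nodup_cons] at h
    by_cases hp : p.1 = n
    · simp only [List.eraseP_cons, List.filter_cons, hp, beq_self_eq_true, cond_true,
        bne_self_eq_false, Bool.false_eq_true, if_false]
      symm
      rw [List.filter_eq_self]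
      intro x hx
      have hxn : x.1 ≠ n := by
        intro e
        exact h.1 (by rw [hp, ← e]; exact List.mem_map_of_mem hx)
      simpa using hxn
    · simp [hp, ih h.2]

-- A's pop loop over the sub-keys is B's membership filter
theorem foldl_eraseP (ks : List Int) : ∀ pg : List (Int × List Int), (pg.map Prod.fst).Nodup →
    ks.foldl (fun g node => g.eraseP (fun p => p.1 == node)) pg
      = pg.filter (fun p => !ks.contains p.1) := by
  induction ks with
  | nil => intro pg _; simp
  | cons s ks ih =>
    intro pg h
    rw [List.foldl_cons, eraseP_keys pg s h,
      ih _ ((List.filter_sublist.map Prod.fst).nodup h), List.filter_filter]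
    apply List.filter_congr
    intro x _
    by_cases e : x.1 = s <;> by_cases m : x.1 ∈ ks <;> simp [e, m]

-- erasing the first occurrence removes every occurrence when there is at most one
theorem erase_eq_filter_of_count_le_one (l : List Int) (a : Int) (h : l.count a ≤ 1) :
    l.erase a = l.filter (fun x => x != a) := by
  induction l with
  | nil => rfl
  | cons b t ih =>
    by_cases hb : b = a
    · subst hb
      rw [List.erase_cons_head, List.filter_cons_of_neg (by simp)]
      symm
      rw [List.filter_eq_self]
      intro x hx
      have : x ≠ b := by
        intro e; subst e
        have h1 : 1 ≤ t.count x := List.count_pos_iff.mpr hx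
        simp [List.count_cons_self] at h
        omega
      simpa using this
    · rw [List.erase_cons_tail (by simpa using hb), List.filter_cons_of_pos (by simpa using hb)]
      congr 1
      apply ih
      simp [hb] at h
      omega

-- A's sequential erase loop = a single membership filter, when no sub-key repeats in adj
theorem foldl_erase_eq_filter (ks : List Int) : ∀ adj : List Int,
    (∀ s ∈ ks, adj.count s ≤ 1) →
    ks.foldl (fun l n => l.erase n) adj = adj.filter (fun n => !ks.contains n) := by
  induction ks with
  | nil => intro adj _; simp
  | cons k ks ih =>
    intro adj h
    rw [List.foldl_cons, erase_eq_filter_of_count_le_one adj k (h k List.mem_cons_self),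
      ih _ (fun s hs => le_trans (List.Sublist.count_le s List.filter_sublist)
        (h s (List.mem_cons_of_mem _ hs))), List.filter_filter]
    apply List.filter_congr
    intro x _
    by_cases e : x = k <;> by_cases m : x ∈ ks <;> simp [e, m]

-- a comprehension with a guard is filter-then-map
theorem filterMap_guard (pg : List (Int × List Int)) (c : Int → Bool)
    (f : Int × List Int → Int × List Int) :
    pg.filterMap (fun p => if c p.1 then none else some (f p))
      = (pg.filter (fun p => !c p.1)).map f := by
  induction pg with
  | nil => rfl
  | cons p rest ih =>
    by_cases hc : c p.1 <;> simp [hc, ih]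

-- the count of s after A's erase loop, for duplicate-free sub-keys
theorem count_foldl_erase (ks : List Int) : ∀ adj : List Int, ks.Nodup → ∀ s : Int,
    (ks.foldl (fun l n => l.erase n) adj).count s
      = adj.count s - (if s ∈ ks then 1 else 0) := by
  induction ks with
  | nil => intro adj _ s; simp
  | cons k ks ih =>
    intro adj h s
    obtain ⟨hk, hnd⟩ := List.nodup_cons.mp h
    rw [List.foldl_cons, ih _ hnd s, List.count_erase]
    by_cases e : s = k
    · subst e
      simp [hk]
    · rw [if_neg (fun hh => e ((eq_of_beq hh).symm))]
      simp [List.mem_cons, e]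

-- both ports rewritten as maps over the same filtered node list
theorem portA_eq (pg sg : List (Int × List Int)) (h : (pg.map Prod.fst).Nodup) :
    split_subgraph pg sg
      = (pg.filter (fun p => !(sg.map Prod.fst).contains p.1)).map
          (fun p => (p.1, (sg.map Prod.fst).foldl (fun l n => l.erase n) p.2)) := by
  have hstep : (fun (l : List Int) (n : Int) =>
      if l.contains n then (PySem.List.remove? l n).getD l else l) = fun l n => l.erase n :=
    funext fun l => funext fun n => eraseOnce_eq_erase l n
  simp only [split_subgraph, hstep]
  rw [foldl_eraseP _ pg h]

theorem portB_eq (pg sg : List (Int × List Int)) (h : (sg.map Prod.fst).Nodup) :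
    split_subgraph_alt pg sg
      = (pg.filter (fun p => !(sg.map Prod.fst).contains p.1)).map
          (fun p => (p.1, p.2.filter (fun n => !(sg.map Prod.fst).contains n))) := by
  simp only [split_subgraph_alt]
  rw [PySem.Set.ofList_eq_self_of_nodup _ h]
  exact filterMap_guard pg _ _

-- ===== VERDICT =====
theorem split_subgraph_spec : Claim_unchanged_split_subgraph := by
  intro pg sg _ hpre hnd
  obtain ⟨h1, h2⟩ := hpre
  show split_subgraph pg sg = split_subgraph_alt pg sg
  rw [portA_eq pg sg h1, portB_eq pg sg h2]
  apply List.map_congr_left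
  intro p hp
  obtain ⟨hmem, hguard⟩ := List.mem_filter.mp hp
  congr 1
  apply foldl_erase_eq_filter
  intro s hs
  by_contra hc
  exact hnd ⟨p, hmem, by simpa using hguard, s, hs, by omega⟩

theorem split_subgraph_changed : Claim_changed_split_subgraph := by
  unfold Claim_changed_split_subgraph; decide

theorem split_subgraph_tight : Claim_exact_split_subgraph := by
  intro pg sg _ hpre hd heq
  obtain ⟨h1, h2⟩ := hpre
  obtain ⟨p, hmem, hnk, s, hs, hc⟩ := hd
  rw [portA_eq pg sg h1, portB_eq pg sg h2] at heq
  have hp : p ∈ pg.filter (fun p => !(sg.map Prod.fst).contains p.1) :=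
    List.mem_filter.mpr ⟨hmem, by simpa using hnk⟩
  have := (List.map_inj_left.mp heq) p hp
  have hadj : (sg.map Prod.fst).foldl (fun l n => l.erase n) p.2
      = p.2.filter (fun n => !(sg.map Prod.fst).contains n) := congrArg Prod.snd this
  have hA : s ∈ (sg.map Prod.fst).foldl (fun l n => l.erase n) p.2 := by
    rw [← List.count_pos_iff, count_foldl_erase _ _ h2 s]
    simp only [hs, if_pos]
    omega
  rw [hadj] at hA
  have := List.mem_filter.mp hA
  simp [hs] at this
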